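-- pv_equiv track=rewrite | github.com/akrilaplekis/sim_game | sim_game.py | check_game
-- ===== SOURCE A (Python) =====
-- def check_game(player_list):
--     play = False #vērtība, kas norādā spēles statusu
--     pl_len = len(player_list)
--     for i in range(pl_len):
--         for j in range(pl_len):
--             if i != j:
--                 if player_list[i][0] == player_list[j][0]: # parbauda vai sakrīt jebkuras 2 spēlētāja līnijas
--                     for n in range(pl_len):
--                         if (player_list[n][0] == player_list[i][1] and player_list[n][1] ==
--                             player_list[j][1]) or (
--                             player_list[n][1] == player_list[i][1] and player_list[n][0] ==
--                                 player_list[j][1]): # pārbauda vai veidojās trijstūris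
--                             play = True
--     return play
-- ===== SOURCE B (Python) =====
-- def check_game(player_list):
--     # Same triangle test, but grouped: index the second coordinates by first
--     # coordinate and hash all edges, instead of A's triple nested scan.
--     edge_set = {(e[0], e[1]) for e in player_list}
--     groups = {}
--     for e in player_list:
--         groups[e[0]] = groups.get(e[0], []) + [e[1]]
--     for seconds in groups.values():
--         for k, b in enumerate(seconds):
--             for c in seconds[k + 1:]:
--                 if (b, c) in edge_set or (c, b) in edge_set:
--                     return True
--     return False
-- ===== Notes on version B (the rewrite author's own statement) =====
-- stated objective: faster
-- what changed: Replaces A's triple nested index scan with one pass that groups each edge's second coordinate by its first coordinate in a dict and puts all edges in a hash set, then tests each unordered pair within a group by two set lookups.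
-- outside the precondition, e.g. on check_game([[1], [2]]): A returns False, B raises IndexError
import Mathlib
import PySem

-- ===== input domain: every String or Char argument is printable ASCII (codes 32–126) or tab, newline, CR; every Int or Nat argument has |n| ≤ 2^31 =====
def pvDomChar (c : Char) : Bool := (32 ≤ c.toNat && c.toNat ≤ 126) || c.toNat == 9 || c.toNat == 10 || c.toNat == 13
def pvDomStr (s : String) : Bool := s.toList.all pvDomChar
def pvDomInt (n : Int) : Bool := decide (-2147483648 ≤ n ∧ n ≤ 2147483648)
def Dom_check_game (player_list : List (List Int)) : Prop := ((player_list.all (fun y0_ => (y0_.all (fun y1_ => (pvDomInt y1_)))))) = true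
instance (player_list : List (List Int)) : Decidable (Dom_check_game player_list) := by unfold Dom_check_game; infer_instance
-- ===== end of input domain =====

-- B replaces A's triple nested index scan by one grouping pass (second coordinates
-- indexed by first coordinate) plus a set of all edges queried per unordered pair.

-- ===== PORT A =====
-- Indexing is via List.getD: exact under Pre_check_game (every index comes from
-- range(len(player_list)) and every edge has length ≥ 2, so Python never raises).
def check_game (player_list : List (List Int)) : Bool :=
  let n := player_list.length
  (List.range n).foldl (fun play i =>
    (List.range n).foldl (fun play j =>
      if i ≠ j then
        if (player_list.getD i []).getD 0 0 == (player_list.getD j []).getD 0 0 then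
          (List.range n).foldl (fun play m =>
            if ((player_list.getD m []).getD 0 0 == (player_list.getD i []).getD 1 0 &&
                (player_list.getD m []).getD 1 0 == (player_list.getD j []).getD 1 0) ||
               ((player_list.getD m []).getD 1 0 == (player_list.getD i []).getD 1 0 &&
                (player_list.getD m []).getD 0 0 == (player_list.getD j []).getD 1 0)
            then true else play) play
        else play
      else play) play) false

-- ===== PORT B =====
-- '(b, c) in edge_set or (c, b) in edge_set'
def pvHit (s : PySem.Set (Int × Int)) (b c : Int) : Bool :=
  PySem.Set.contains s (b, c) || PySem.Set.contains s (c, b)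

-- 'for k, b in enumerate(seconds): for c in seconds[k+1:]: …' — each step tests the
-- head against the rest (the suffix seconds[k+1:]) and recurses on the rest.
def pvPairsHit (s : PySem.Set (Int × Int)) : List Int → Bool
  | [] => false
  | b :: rest => rest.any (fun c => pvHit s b c) || pvPairsHit s rest

def check_game_alt (player_list : List (List Int)) : Bool :=
  let edgeSet : PySem.Set (Int × Int) :=
    PySem.Set.ofList (player_list.map (fun e => (e.getD 0 0, e.getD 1 0)))
  let groups : PySem.Dict Int (List Int) :=
    player_list.foldl
      (fun d e => d.insert (e.getD 0 0) (d.getD (e.getD 0 0) [] ++ [e.getD 1 0]))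
      PySem.Dict.empty
  (PySem.Dict.values groups).any (fun seconds => pvPairsHit edgeSet seconds)

-- ===== PRECONDITION & SPEC =====
-- Pre_ excludes lists containing an edge with fewer than 2 elements: on those Python A
-- either raises IndexError or (when its lazy indexing never reaches a second element)
-- happens to return False, while B's set/dict build always raises IndexError there.
def Pre_check_game (player_list : List (List Int)) : Prop :=
  ∀ e ∈ player_list, 2 ≤ e.length
instance (player_list : List (List Int)) : Decidable (Pre_check_game player_list) := by
  unfold Pre_check_game; infer_instance
def pvWitness_check_game : List (List Int) := [[0, 1], [0, 2], [1, 2]]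

def Spec_check_game (player_list : List (List Int)) (out : Bool) : Prop := out = check_game_alt player_list
instance (player_list : List (List Int)) (out : Bool) : Decidable (Spec_check_game player_list out) := by unfold Spec_check_game; infer_instance

-- ===== CLAIM (what is proved, stated in full; the proofs are below) =====
def Claim_equal_check_game : Prop := ∀ (player_list : List (List Int)), Dom_check_game player_list → Pre_check_game player_list → Spec_check_game player_list (check_game player_list)

-- ===== LEMMAS AND PROOFS =====

-- proof-only abbreviations
def pvK0 (e : List Int) : Int := e.getD 0 0
def pvK1 (e : List Int) : Int := e.getD 1 0
def pvGrp (pl : List (List Int)) (a : Int) : List Int :=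
  (pl.filter (fun e => e.getD 0 0 == a)).map (fun e => e.getD 1 0)
def pvG (pl : List (List Int)) : PySem.Dict Int (List Int) :=
  pl.foldl
    (fun d e => d.insert (e.getD 0 0) (d.getD (e.getD 0 0) [] ++ [e.getD 1 0]))
    PySem.Dict.empty
def pvS (pl : List (List Int)) : PySem.Set (Int × Int) :=
  PySem.Set.ofList (pl.map (fun e => (e.getD 0 0, e.getD 1 0)))
-- "some edge of pl is (b, c) or (c, b)", as a Prop
def pvHitP (pl : List (List Int)) (b c : Int) : Prop :=
  (∃ e ∈ pl, pvK0 e = b ∧ pvK1 e = c) ∨ (∃ e ∈ pl, pvK0 e = c ∧ pvK1 e = b)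

lemma pv_foldl_or_of {α : Type} (f : Bool → α → Bool) (g : α → Bool)
    (h : ∀ b x, f b x = (b || g x)) : ∀ (l : List α) (b : Bool),
    l.foldl f b = (b || l.any g) := by
  intro l
  induction l with
  | nil => intro b; simp
  | cons x t ih => intro b; simp [List.foldl_cons, h, ih, Bool.or_assoc]

lemma pv_nested (n : Nat) (eqb : Nat → Nat → Bool) (cnd : Nat → Nat → Nat → Bool) :
    ((List.range n).foldl (fun play i =>
      (List.range n).foldl (fun play j =>
        if i ≠ j then
          if eqb i j then
            (List.range n).foldl (fun play m => if cnd i j m then true else play) play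
          else play
        else play) play) false)
    = (List.range n).any (fun i => (List.range n).any (fun j =>
        decide (i ≠ j) && eqb i j && (List.range n).any (cnd i j))) := by
  have hinner : ∀ i j (b : Bool),
      (List.range n).foldl (fun play m => if cnd i j m then true else play) b
        = (b || (List.range n).any (cnd i j)) := by
    intro i j b
    exact pv_foldl_or_of _ _ (fun b m => by cases cnd i j m <;> simp) _ b
  have hmid : ∀ i (b : Bool),
      (List.range n).foldl (fun play j =>
        if i ≠ j then
          if eqb i j then
            (List.range n).foldl (fun play m => if cnd i j m then true else play) play
          else play
        else play) b
      = (b || (List.range n).any (fun j =>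
          decide (i ≠ j) && eqb i j && (List.range n).any (cnd i j))) := by
    intro i b
    refine pv_foldl_or_of _ _ (fun b j => ?_) _ b
    by_cases hij : i = j
    · rw [if_neg (fun h => h hij)]; simp [hij]
    · rw [if_pos hij]
      cases eqb i j
      · simp
      · rw [hinner]; simp [hij]
  rw [pv_foldl_or_of _ _ (fun b i => hmid i b) _ false, Bool.false_or]

lemma pv_A_iff (pl : List (List Int)) : check_game pl = true ↔
    ∃ i j, i < pl.length ∧ j < pl.length ∧ i ≠ j ∧
      pvK0 (pl.getD i []) = pvK0 (pl.getD j []) ∧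
      ∃ m, m < pl.length ∧
        ((pvK0 (pl.getD m []) = pvK1 (pl.getD i []) ∧ pvK1 (pl.getD m []) = pvK1 (pl.getD j [])) ∨
         (pvK1 (pl.getD m []) = pvK1 (pl.getD i []) ∧ pvK0 (pl.getD m []) = pvK1 (pl.getD j []))) := by
  rw [show check_game pl
      = (List.range pl.length).any (fun i => (List.range pl.length).any (fun j =>
          decide (i ≠ j) && ((pl.getD i []).getD 0 0 == (pl.getD j []).getD 0 0) &&
          (List.range pl.length).any (fun m =>
            ((pl.getD m []).getD 0 0 == (pl.getD i []).getD 1 0 &&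
             (pl.getD m []).getD 1 0 == (pl.getD j []).getD 1 0) ||
            ((pl.getD m []).getD 1 0 == (pl.getD i []).getD 1 0 &&
             (pl.getD m []).getD 0 0 == (pl.getD j []).getD 1 0))))
    from pv_nested pl.length _ _]
  simp only [List.any_eq_true, List.mem_range, Bool.and_eq_true, Bool.or_eq_true,
    decide_eq_true_eq, beq_iff_eq, pvK0, pvK1]
  constructor
  · rintro ⟨i, hi, j, hj, ⟨hij, heq⟩, m, hm, hc⟩
    exact ⟨i, j, hi, hj, hij, heq, m, hm, hc⟩
  · rintro ⟨i, j, hi, hj, hij, heq, m, hm, hc⟩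
    exact ⟨i, hi, j, hj, ⟨hij, heq⟩, m, hm, hc⟩

lemma pvG_append (t : List (List Int)) (e : List Int) :
    pvG (t ++ [e]) = (pvG t).insert (e.getD 0 0) ((pvG t).getD (e.getD 0 0) [] ++ [e.getD 1 0]) := by
  simp only [pvG, List.foldl_append, List.foldl_cons, List.foldl_nil]

lemma pvGrp_append (t : List (List Int)) (e : List Int) (a : Int) :
    pvGrp (t ++ [e]) a =
      pvGrp t a ++ (if e.getD 0 0 = a then [e.getD 1 0] else []) := by
  simp only [pvGrp, List.filter_append, List.filter_cons, List.filter_nil, List.map_append]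
  by_cases h : e.getD 0 0 = a
  · rw [if_pos h, if_pos (by simpa using h)]; simp
  · rw [if_neg h, if_neg (by simpa using h)]; simp

lemma pv_getDG (pl : List (List Int)) (a : Int) : (pvG pl).getD a [] = pvGrp pl a := by
  induction pl using List.reverseRecOn generalizing a with
  | nil =>
    simp only [pvG, List.foldl_nil, PySem.Dict.getD_empty, pvGrp, List.filter_nil, List.map_nil]
  | append_singleton t e ih =>
    rw [pvG_append, PySem.Dict.getD_insert, pvGrp_append]
    by_cases h : a = e.getD 0 0
    · rw [if_pos h, if_pos h.symm, ih, h]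
    · rw [if_neg h, if_neg (fun hh => h hh.symm), ih, List.append_nil]

lemma pv_itemsG (pl : List (List Int)) (p : Int × List Int) :
    p ∈ (pvG pl).items ↔ (∃ e ∈ pl, pvK0 e = p.1) ∧ p.2 = pvGrp pl p.1 := by
  simp only [pvK0]
  induction pl using List.reverseRecOn with
  | nil =>
    constructor
    · intro h; exact absurd h (by simp [pvG, PySem.Dict.empty])
    · rintro ⟨⟨e, he, _⟩, _⟩; simp at he
  | append_singleton t e ih =>
    rw [pvG_append, PySem.Dict.mem_items_insert, pv_getDG]
    constructor
    · rintro (rfl | ⟨hp, hne⟩)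
      · exact ⟨⟨e, by simp, rfl⟩, by rw [pvGrp_append, if_pos rfl]⟩
      · rcases ih.1 hp with ⟨⟨e', he', hk⟩, hv⟩
        refine ⟨⟨e', by simp [he'], hk⟩, ?_⟩
        rw [pvGrp_append, if_neg (fun hh => hne hh.symm), List.append_nil]; exact hv
    · rintro ⟨⟨e', he', hk⟩, hv⟩
      by_cases h : p.1 = e.getD 0 0
      · left
        refine Prod.ext h ?_
        rw [hv, h, pvGrp_append, if_pos rfl]
      · right
        have he'' : e' ∈ t := by
          rcases List.mem_append.1 he' with h' | h'
          · exact h'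
          · exfalso; simp only [List.mem_singleton] at h'; subst h'; exact h (hk ▸ rfl)
        refine ⟨ih.2 ⟨⟨e', he'', hk⟩, ?_⟩, h⟩
        rw [pvGrp_append, if_neg (fun hh => h hh.symm), List.append_nil] at hv
        exact hv

lemma pv_memS (pl : List (List Int)) (x : Int × Int) :
    PySem.Set.contains (pvS pl) x = true ↔ ∃ e ∈ pl, pvK0 e = x.1 ∧ pvK1 e = x.2 := by
  have h : PySem.Set.contains (pvS pl) x = true ↔ x ∈ pvS pl := by
    show List.contains _ x = true ↔ _
    simp
  rw [h, pvS, PySem.Set.mem_ofList]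
  simp only [List.mem_map, pvK0, pvK1]
  constructor
  · rintro ⟨e, he, heq⟩
    exact ⟨e, he, by rw [← heq], by rw [← heq]⟩
  · rintro ⟨e, he, h1, h2⟩
    exact ⟨e, he, Prod.ext h1 h2⟩

lemma pv_hit_iff (pl : List (List Int)) (b c : Int) :
    pvHit (pvS pl) b c = true ↔ pvHitP pl b c := by
  rw [pvHit, Bool.or_eq_true, pv_memS, pv_memS, pvHitP]

lemma pv_pair_sublist_cons {α : Type} (b c x : α) (t : List α) :
    ([b, c] : List α).Sublist (x :: t) ↔ ([b, c] : List α).Sublist t ∨ (b = x ∧ c ∈ t) := by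
  rw [List.sublist_cons_iff]
  constructor
  · rintro (h | ⟨r, hr, hrs⟩)
    · exact Or.inl h
    · cases hr
      exact Or.inr ⟨rfl, List.singleton_sublist.1 hrs⟩
  · rintro (h | ⟨rfl, hc⟩)
    · exact Or.inl h
    · exact Or.inr ⟨[c], rfl, List.singleton_sublist.2 hc⟩

lemma pv_pairsHit_iff (s : PySem.Set (Int × Int)) (xs : List Int) :
    pvPairsHit s xs = true ↔ ∃ b c, ([b, c] : List Int).Sublist xs ∧ pvHit s b c = true := by
  induction xs with
  | nil => simp [pvPairsHit]
  | cons x t ih =>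
    simp only [pvPairsHit, Bool.or_eq_true, List.any_eq_true, ih]
    constructor
    · rintro (⟨c, hc, hh⟩ | ⟨b, c, hbc, hh⟩)
      · exact ⟨x, c, (pv_pair_sublist_cons _ _ _ _).2 (Or.inr ⟨rfl, hc⟩), hh⟩
      · exact ⟨b, c, (pv_pair_sublist_cons _ _ _ _).2 (Or.inl hbc), hh⟩
    · rintro ⟨b, c, hbc, hh⟩
      rcases (pv_pair_sublist_cons _ _ _ _).1 hbc with h | ⟨rfl, hc⟩
      · exact Or.inr ⟨b, c, h, hh⟩
      · exact Or.inl ⟨c, hc, hh⟩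

lemma pv_pair_sublist_map {α β : Type} (f : α → β) (xs : List α) (b c : β) :
    ([b, c] : List β).Sublist (xs.map f) ↔ ∃ x y, ([x, y] : List α).Sublist xs ∧ f x = b ∧ f y = c := by
  rw [List.sublist_map_iff]
  constructor
  · rintro ⟨l', hl', heq⟩
    match l', heq with
    | [x, y], heq =>
      simp only [List.map_cons, List.map_nil] at heq
      cases heq
      exact ⟨x, y, hl', rfl, rfl⟩
  · rintro ⟨x, y, hxy, rfl, rfl⟩
    exact ⟨[x, y], hxy, rfl⟩

lemma pv_pair_sublist_filter {α : Type} (q : α → Bool) (xs : List α) (x y : α) :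
    ([x, y] : List α).Sublist (xs.filter q) ↔ ([x, y] : List α).Sublist xs ∧ q x = true ∧ q y = true := by
  constructor
  · intro h
    have hx : x ∈ xs.filter q := h.subset (by simp)
    have hy : y ∈ xs.filter q := h.subset (by simp)
    exact ⟨h.trans (List.filter_sublist), List.of_mem_filter hx, List.of_mem_filter hy⟩
  · rintro ⟨h, hx, hy⟩
    have := h.filter q
    rwa [List.filter_cons_of_pos hx, List.filter_cons_of_pos hy, List.filter_nil] at this

lemma pv_exists_getD_iff_mem {α : Type} (d : α) (P : α → Prop) (xs : List α) :
    (∃ m, m < xs.length ∧ P (xs.getD m d)) ↔ ∃ e ∈ xs, P e := by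
  constructor
  · rintro ⟨m, hm, hp⟩
    exact ⟨xs.getD m d, by rw [List.getD_eq_getElem _ _ hm]; exact xs.getElem_mem hm, hp⟩
  · rintro ⟨e, he, hp⟩
    rcases List.mem_iff_getElem.1 he with ⟨m, hm, rfl⟩
    exact ⟨m, hm, by rwa [List.getD_eq_getElem _ _ hm]⟩

lemma pv_pair_sublist_iff_getD {α : Type} (d : α) (R : α → α → Prop) (xs : List α) :
    (∃ b c, ([b, c] : List α).Sublist xs ∧ R b c) ↔
      ∃ i j, i < j ∧ j < xs.length ∧ R (xs.getD i d) (xs.getD j d) := by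
  induction xs with
  | nil => simp
  | cons x t ih =>
    constructor
    · rintro ⟨b, c, hbc, hr⟩
      rcases (pv_pair_sublist_cons _ _ _ _).1 hbc with h | ⟨rfl, hc⟩
      · rcases ih.1 ⟨b, c, h, hr⟩ with ⟨i, j, hij, hj, hr'⟩
        exact ⟨i + 1, j + 1, by omega, by simpa using hj, by simpa using hr'⟩
      · rcases (pv_exists_getD_iff_mem d (fun e => R b e) t).2 ⟨c, hc, hr⟩ with ⟨j, hj, hr'⟩
        exact ⟨0, j + 1, by omega, by simpa using hj, by simpa using hr'⟩
    · rintro ⟨i, j, hij, hj, hr⟩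
      match i, j, hij with
      | 0, j + 1, _ =>
        simp only [List.length_cons, Nat.add_lt_add_iff_right] at hj
        refine ⟨x, t.getD j d, ?_, by simpa using hr⟩
        refine (pv_pair_sublist_cons _ _ _ _).2 (Or.inr ⟨rfl, ?_⟩)
        rw [List.getD_eq_getElem _ _ hj]; exact t.getElem_mem hj
      | i + 1, j + 1, hij =>
        rcases ih.2 ⟨i, j, by omega, by simpa using hj, by simpa using hr⟩ with ⟨b, c, hbc, hr'⟩
        exact ⟨b, c, (pv_pair_sublist_cons _ _ _ _).2 (Or.inl hbc), hr'⟩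

lemma pv_B_eq (pl : List (List Int)) :
    check_game_alt pl = (pvG pl).items.any (fun p => pvPairsHit (pvS pl) p.2) := by
  show (PySem.Dict.values (pvG pl)).any (fun s => pvPairsHit (pvS pl) s) = _
  rw [show PySem.Dict.values (pvG pl) = (pvG pl).items.map Prod.snd from rfl, List.any_map]
  rfl

lemma pv_B_iff (pl : List (List Int)) : check_game_alt pl = true ↔
    ∃ x y, ([x, y] : List (List Int)).Sublist pl ∧ pvK0 x = pvK0 y ∧ pvHitP pl (pvK1 x) (pvK1 y) := by
  rw [pv_B_eq]
  simp only [List.any_eq_true]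
  constructor
  · rintro ⟨p, hp, hph⟩
    rcases (pv_itemsG pl p).1 hp with ⟨⟨e, he, hk⟩, hv⟩
    rw [hv] at hph
    rcases (pv_pairsHit_iff _ _).1 hph with ⟨b, c, hbc, hh⟩
    rcases (pv_pair_sublist_map _ _ _ _).1 (by simpa [pvGrp] using hbc) with ⟨x, y, hxy, hfx, hfy⟩
    rcases (pv_pair_sublist_filter _ _ _ _).1 hxy with ⟨hsub, hqx, hqy⟩
    have hx : pvK0 x = p.1 := by simpa [pvK0] using hqx
    have hy : pvK0 y = p.1 := by simpa [pvK0] using hqy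
    refine ⟨x, y, hsub, hx.trans hy.symm, ?_⟩
    have : pvK1 x = b := hfx
    have h2 : pvK1 y = c := hfy
    rw [this, h2]
    exact (pv_hit_iff pl b c).1 hh
  · rintro ⟨x, y, hsub, hk, hh⟩
    refine ⟨(pvK0 x, pvGrp pl (pvK0 x)),
      (pv_itemsG pl _).2 ⟨⟨x, hsub.subset (by simp), rfl⟩, rfl⟩, ?_⟩
    apply (pv_pairsHit_iff _ _).2
    refine ⟨pvK1 x, pvK1 y, ?_, (pv_hit_iff pl _ _).2 hh⟩
    show ([pvK1 x, pvK1 y] : List Int).Sublist (pvGrp pl (pvK0 x))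
    rw [pvGrp]
    apply (pv_pair_sublist_map _ _ _ _).2
    refine ⟨x, y, (pv_pair_sublist_filter _ _ _ _).2 ⟨hsub, ?_, ?_⟩, rfl, rfl⟩
    · simp [pvK0]
    · simp only [beq_iff_eq]; exact hk.symm

lemma pv_hitP_comm (pl : List (List Int)) (b c : Int) : pvHitP pl b c ↔ pvHitP pl c b := by
  rw [pvHitP, pvHitP]; exact Or.comm

lemma pv_main (pl : List (List Int)) : check_game pl = check_game_alt pl := by
  rw [Bool.eq_iff_iff, pv_A_iff, pv_B_iff]
  have hA : ∀ i j, (∃ m, m < pl.length ∧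
        ((pvK0 (pl.getD m []) = pvK1 (pl.getD i []) ∧ pvK1 (pl.getD m []) = pvK1 (pl.getD j [])) ∨
         (pvK1 (pl.getD m []) = pvK1 (pl.getD i []) ∧ pvK0 (pl.getD m []) = pvK1 (pl.getD j []))))
      ↔ pvHitP pl (pvK1 (pl.getD i [])) (pvK1 (pl.getD j [])) := by
    intro i j
    rw [pv_exists_getD_iff_mem ([] : List Int)
      (fun e => (pvK0 e = pvK1 (pl.getD i []) ∧ pvK1 e = pvK1 (pl.getD j [])) ∨
                (pvK1 e = pvK1 (pl.getD i []) ∧ pvK0 e = pvK1 (pl.getD j []))), pvHitP]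
    constructor
    · rintro ⟨e, he, h1 | h2⟩
      · exact Or.inl ⟨e, he, h1⟩
      · exact Or.inr ⟨e, he, h2.2, h2.1⟩
    · rintro (⟨e, he, h1⟩ | ⟨e, he, h2⟩)
      · exact ⟨e, he, Or.inl h1⟩
      · exact ⟨e, he, Or.inr ⟨h2.2, h2.1⟩⟩
  rw [show (∃ x y, ([x, y] : List (List Int)).Sublist pl ∧ pvK0 x = pvK0 y ∧
        pvHitP pl (pvK1 x) (pvK1 y))
      ↔ ∃ i j, i < j ∧ j < pl.length ∧
          (pvK0 (pl.getD i []) = pvK0 (pl.getD j []) ∧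
           pvHitP pl (pvK1 (pl.getD i [])) (pvK1 (pl.getD j []))) from by
    rw [← pv_pair_sublist_iff_getD ([] : List Int)
      (fun x y => pvK0 x = pvK0 y ∧ pvHitP pl (pvK1 x) (pvK1 y)) pl]]
  constructor
  · rintro ⟨i, j, hi, hj, hij, heq, hrest⟩
    rcases Nat.lt_or_ge i j with h | h
    · exact ⟨i, j, h, hj, heq, (hA i j).1 hrest⟩
    · have hji : j < i := by omega
      exact ⟨j, i, hji, hi, heq.symm, (pv_hitP_comm _ _ _).1 ((hA i j).1 hrest)⟩
  · rintro ⟨i, j, hij, hj, heq, hhit⟩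
    exact ⟨i, j, by omega, hj, by omega, heq, (hA i j).2 hhit⟩

-- ===== VERDICT (by name: the statement is the Claim_ definition above) =====
theorem check_game_spec : Claim_equal_check_game := by
  intro pl _ _
  unfold Spec_check_game
  exact pv_main pl
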